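-- pv_equiv track=rewrite | github.com/evawenis/oscp-scripts | pysqllib/arguments.py | retr_table_dic
-- ===== SOURCE A (Python) =====
-- def retr_table_dic(raw_databases, raw_tables):
--     result = {}
--     for db, tb in zip(raw_databases, raw_tables):
--         if db not in result:
--             result[db] = []
--         if tb not in result[db]:
--             result[db].append(tb)
--
--     return result
-- ===== SOURCE B (Python) =====
-- def retr_table_dic(raw_databases, raw_tables):
--     pairs = list(zip(raw_databases, raw_tables))
--     out = {}
--     for db in dict.fromkeys(d for d, _ in pairs):
--         seen = []
--         for d, t in pairs:
--             if d == db and t not in seen: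
--                 seen.append(t)
--         out[db] = seen
--     return out
-- ===== Notes on version B (the rewrite author's own statement) =====
-- stated objective: alternative
-- what changed: Replaces A's single interleaved pass that mutates a dict (create-bucket / membership-checked append per element) by a nested-scan algorithm: an outer loop over the distinct databases in first-occurrence order, and for each one an inner scan of all pairs collecting that database's tables with ordered dedup.
import Mathlib
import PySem

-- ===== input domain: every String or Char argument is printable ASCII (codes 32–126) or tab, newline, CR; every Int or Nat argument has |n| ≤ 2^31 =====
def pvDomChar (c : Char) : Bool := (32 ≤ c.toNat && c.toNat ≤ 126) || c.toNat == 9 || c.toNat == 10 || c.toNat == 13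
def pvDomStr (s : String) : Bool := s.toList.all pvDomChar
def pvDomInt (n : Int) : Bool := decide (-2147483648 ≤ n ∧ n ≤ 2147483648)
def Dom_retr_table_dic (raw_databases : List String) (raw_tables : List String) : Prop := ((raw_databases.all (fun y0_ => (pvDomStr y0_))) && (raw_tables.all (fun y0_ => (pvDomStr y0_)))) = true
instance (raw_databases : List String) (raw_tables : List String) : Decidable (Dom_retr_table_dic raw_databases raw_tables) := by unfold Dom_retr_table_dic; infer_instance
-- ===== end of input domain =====

-- B replaces A's single interleaved dict-mutating pass by a nested-scan algorithm:
-- outer loop over distinct databases in first-occurrence order, inner scan over all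
-- pairs collecting that database's tables deduped. Same return value; no mutation.

-- ===== PORT A =====
-- one loop step of A: ensure the bucket exists, then append tb if not already present
def stepA (result : PySem.Dict String (List String)) (p : String × String) :
    PySem.Dict String (List String) :=
  let r := if result.contains p.1 then result else result.insert p.1 ([] : List String)
  if p.2 ∈ r.getD p.1 [] then r else r.insert p.1 (r.getD p.1 [] ++ [p.2])

def retr_table_dic (raw_databases : List String) (raw_tables : List String) :
    List (String × List String) :=
  ((raw_databases.zip raw_tables).foldl stepA PySem.Dict.empty).items

-- ===== PORT B =====
-- inner loop of B: scan all pairs, appending the table if it belongs to db and is new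
def collectB (pairs : List (String × String)) (db : String) : List String :=
  pairs.foldl (fun seen p => if p.1 = db ∧ p.2 ∉ seen then seen ++ [p.2] else seen) []

def retr_table_dic_alt (raw_databases : List String) (raw_tables : List String) :
    List (String × List String) :=
  let pairs := raw_databases.zip raw_tables
  ((PySem.List.dedup (pairs.map Prod.fst)).foldl
    (fun out db => out.insert db (collectB pairs db)) PySem.Dict.empty).items

-- ===== PRECONDITION & SPEC =====
def Spec_retr_table_dic (raw_databases : List String) (raw_tables : List String) (out : List (String × List String)) : Prop := out = retr_table_dic_alt raw_databases raw_tables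
instance (raw_databases : List String) (raw_tables : List String) (out : List (String × List String)) : Decidable (Spec_retr_table_dic raw_databases raw_tables out) := by unfold Spec_retr_table_dic; infer_instance

-- ===== CLAIM =====
def Claim_equal_retr_table_dic : Prop := ∀ (raw_databases : List String) (raw_tables : List String), Dom_retr_table_dic raw_databases raw_tables → Spec_retr_table_dic raw_databases raw_tables (retr_table_dic raw_databases raw_tables)

-- ===== LEMMAS AND PROOFS =====

-- the tables of database k in l, first occurrences in order
def bucket (l : List (String × String)) (k : String) : List String :=
  PySem.Set.ofList ((l.filter (fun p => p.1 == k)).map Prod.snd)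

-- the items list both algorithms produce
def modelItems (l : List (String × String)) : List (String × List String) :=
  (PySem.List.dedup (l.map Prod.fst)).map (fun k => (k, bucket l k))

theorem bucket_append (l : List (String × String)) (p : String × String) (k : String) :
    bucket (l ++ [p]) k =
      if p.1 = k then PySem.Set.add (bucket l k) p.2 else bucket l k := by
  unfold bucket
  rw [List.filter_append]
  by_cases h : p.1 = k
  · simp [h, PySem.Set.ofList_append_singleton]
  · have hb : (p.1 == k) = false := beq_eq_false_iff_ne.mpr h
    simp [List.filter, hb, h]

-- B's inner scan computes bucket
theorem collectB_eq_bucket (l : List (String × String)) (k : String) :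
    collectB l k = bucket l k := by
  have key : ∀ (l : List (String × String)) (s : List String),
      l.foldl (fun seen p => if p.1 = k ∧ p.2 ∉ seen then seen ++ [p.2] else seen) s =
      ((l.filter (fun p => p.1 == k)).map Prod.snd).foldl PySem.Set.add s := by
    intro l
    induction l with
    | nil => intro s; rfl
    | cons p t ih =>
        intro s
        by_cases hp : p.1 = k
        · by_cases hm : p.2 ∈ s
          · simp [hp, hm, List.filter, PySem.Set.add, ih]
          · simp [hp, hm, List.filter, PySem.Set.add, ih]
        · have hb : (p.1 == k) = false := beq_eq_false_iff_ne.mpr hp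
          simp [hp, hb, List.filter, ih]
  unfold collectB bucket
  rw [key, PySem.Set.ofList_eq_foldl]

theorem keys_modelItems (l : List (String × String)) :
    (modelItems l).map Prod.fst = PySem.List.dedup (l.map Prod.fst) := by
  unfold modelItems
  rw [List.map_map]
  rw [show (Prod.fst ∘ fun k => (k, bucket l k)) = id from funext fun _ => rfl, List.map_id]

theorem nodup_keys_modelItems (l : List (String × String)) :
    ((PySem.Dict.mk (modelItems l)).keys).Nodup := by
  rw [PySem.Dict.keys_mk, keys_modelItems]
  exact PySem.List.nodup_dedup _

-- the invariant step: A's loop body preserves the model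
theorem stepA_model (l : List (String × String)) (p : String × String) :
    stepA (PySem.Dict.mk (modelItems l)) p = PySem.Dict.mk (modelItems (l ++ [p])) := by
  set d := PySem.Dict.mk (modelItems l) with hd
  have hkeys : d.keys = PySem.List.dedup (l.map Prod.fst) := by
    rw [hd, PySem.Dict.keys_mk, keys_modelItems]
  have hnd : d.keys.Nodup := nodup_keys_modelItems l
  have hcontains : d.contains p.1 = decide (p.1 ∈ l.map Prod.fst) := by
    rw [PySem.Dict.contains_eq_decide_mem_keys, hkeys]
    simp
  have hkeys' : PySem.List.dedup ((l ++ [p]).map Prod.fst) =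
      PySem.Set.add (PySem.List.dedup (l.map Prod.fst)) p.1 := by
    simp [PySem.Set.ofList_append_singleton]
  by_cases hc : p.1 ∈ l.map Prod.fst
  · -- key already present
    have hcon : d.contains p.1 = true := by rw [hcontains]; simpa using hc
    have hmem : (p.1, bucket l p.1) ∈ d.items := by
      rw [hd]
      show _ ∈ modelItems l
      unfold modelItems
      exact List.mem_map.mpr ⟨p.1, by simp [hc], rfl⟩
    have hget : d.getD p.1 [] = bucket l p.1 :=
      PySem.Dict.getD_of_mem_items d hmem hnd []
    have hkeq : PySem.List.dedup ((l ++ [p]).map Prod.fst) =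
        PySem.List.dedup (l.map Prod.fst) := by
      rw [hkeys']
      exact PySem.Set.add_of_mem (by simpa [PySem.List.mem_dedup] using hc)
    unfold stepA
    simp only [hcon, if_true]
    by_cases hm : p.2 ∈ bucket l p.1
    · -- table already in the bucket: nothing changes
      rw [hget, if_pos hm, hd]
      congr 1
      unfold modelItems
      rw [hkeq]
      apply List.map_congr_left
      intro k hk
      rw [bucket_append]
      by_cases hpk : p.1 = k
      · subst hpk; rw [if_pos rfl, PySem.Set.add_of_mem hm]
      · rw [if_neg hpk]
    · -- append the new table to p.1's bucket
      rw [hget, if_neg hm]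
      apply PySem.Dict.ext
      rw [PySem.Dict.items_insert_of_contains _ _ hcon]
      show (modelItems l).map _ = modelItems (l ++ [p])
      unfold modelItems
      rw [hkeq, List.map_map]
      apply List.map_congr_left
      intro k hk
      dsimp only [Function.comp]
      rw [bucket_append]
      by_cases hpk : p.1 = k
      · subst hpk
        rw [PySem.Set.add_of_not_mem hm]
        simp
      · have : (k == p.1) = false := by
          simpa [beq_eq_false_iff_ne] using fun h => hpk h.symm
        simp [this, hpk]
  · -- fresh key: a new bucket [p.2] is appended
    have hcon : d.contains p.1 = false := by rw [hcontains]; simpa using hc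
    unfold stepA
    simp only [hcon, Bool.false_eq_true, if_false]
    rw [PySem.Dict.getD_insert_self]
    simp only [List.not_mem_nil, if_false, List.nil_append]
    rw [PySem.Dict.insert_insert_self]
    apply PySem.Dict.ext
    rw [PySem.Dict.items_insert_of_not_contains _ _ hcon]
    show modelItems l ++ [(p.1, [p.2])] = modelItems (l ++ [p])
    unfold modelItems
    have hkeq : PySem.List.dedup ((l ++ [p]).map Prod.fst) =
        PySem.List.dedup (l.map Prod.fst) ++ [p.1] := by
      rw [hkeys']
      exact PySem.Set.add_of_not_mem (by simpa [PySem.List.mem_dedup] using hc)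
    rw [hkeq, List.map_append, List.map_cons, List.map_nil]
    congr 1
    · apply List.map_congr_left
      intro k hk
      rw [bucket_append]
      have hpk : ¬ p.1 = k := by
        intro h; subst h
        exact hc (by simpa [PySem.List.mem_dedup] using hk)
      rw [if_neg hpk]
    · have hfil : l.filter (fun q => q.1 == p.1) = [] := by
        rw [List.filter_eq_nil_iff]
        intro q hq hb
        exact hc (List.mem_map.mpr ⟨q, hq, eq_of_beq hb⟩)
      have hb : bucket (l ++ [p]) p.1 = [p.2] := by
        rw [bucket_append, if_pos rfl]
        unfold bucket
        rw [hfil]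
        rfl
      rw [hb]

-- a fold inserting distinct fresh keys builds exactly the corresponding map
theorem items_foldl_insert_map (l : List String) (f : String → List String)
    (h : l.Nodup) :
    (l.foldl (fun out db => out.insert db (f db)) PySem.Dict.empty).items =
      l.map (fun db => (db, f db)) := by
  have := PySem.Dict.items_foldl_insert_fresh l (fun db => db) f PySem.Dict.empty
    (fun _ _ => PySem.Dict.contains_empty _) (by simpa using h)
  simpa using this

-- A's whole loop produces the model
theorem foldl_stepA_model (l : List (String × String)) :
    (l.foldl stepA PySem.Dict.empty).items = modelItems l := by
  induction l using List.reverseRecOn with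
  | nil => rfl
  | append_singleton t p ih =>
      have hmk : t.foldl stepA PySem.Dict.empty = PySem.Dict.mk (modelItems t) := by
        apply PySem.Dict.ext; rw [ih]
      rw [List.foldl_append, List.foldl_cons, List.foldl_nil, hmk, stepA_model]

-- ===== VERDICT =====
theorem retr_table_dic_spec : Claim_equal_retr_table_dic := by
  intro raw_databases raw_tables _
  unfold Spec_retr_table_dic retr_table_dic retr_table_dic_alt
  rw [foldl_stepA_model]
  show modelItems _ =
    ((PySem.List.dedup ((raw_databases.zip raw_tables).map Prod.fst)).foldl
      (fun out db => out.insert db (collectB (raw_databases.zip raw_tables) db))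
      PySem.Dict.empty).items
  rw [items_foldl_insert_map _ _
    (PySem.List.nodup_dedup ((raw_databases.zip raw_tables).map Prod.fst))]
  unfold modelItems
  exact List.map_congr_left (fun k _ => by rw [collectB_eq_bucket])
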